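-- pv_equiv track=rewrite | github.com/Hungmh0205/Shadowprobe | scanner/vulnerabilities/module_vuln_scan/utils.py | is_noise_line
-- ===== SOURCE A (Python) =====
-- NOISE_PATTERNS = [
--     "[ERROR]",
--     "Command error:",
--     "Traceback",
--     "Exception",
--     " failed:",
--     "Error running",
--     "Make sure",
--     "not found",
--     "timeout",
--     "timed out",
--     "Timeout",
-- ]
--
-- def is_noise_line(line: str) -> bool:
--     """Return True if a line is likely an operational/tool error rather than a security finding."""
--     if not line:
--         return True
--     lower_line = line.lower()
--     # Skip explicit error tags fast
--     if "[error]" in lower_line: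
--         return True
--     # Generic noise patterns
--     for pat in NOISE_PATTERNS:
--         if pat.lower() in lower_line:
--             return True
--     return False
-- ===== SOURCE B (Python) =====
-- NOISE_PATTERNS = [
--     "[ERROR]",
--     "Command error:",
--     "Traceback",
--     "Exception",
--     " failed:",
--     "Error running",
--     "Make sure",
--     "not found",
--     "timeout",
--     "timed out",
--     "Timeout",
-- ]
--
--
-- def _build_dispatch(patterns):
--     """First-character dispatch table for a single-pass multi-pattern matcher:
--     maps each starting character to the distinct lowercased patterns beginning with it."""
--     table = {}
--     for p in dict.fromkeys(pat.lower() for pat in patterns):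
--         table.setdefault(p[0], []).append(p)
--     return table
--
--
-- _DISPATCH = _build_dispatch(NOISE_PATTERNS)
--
--
-- def is_noise_line(line: str) -> bool:
--     """Return True if a line is likely an operational/tool error rather than a security finding."""
--     if not line:
--         return True
--     low = line.lower()
--     # one pass over the line: positions whose character starts no pattern are skipped by a dict lookup
--     for i, ch in enumerate(low):
--         for pat in _DISPATCH.get(ch, ()):
--             if low.startswith(pat, i):
--                 return True
--     return False
-- ===== Notes on version B (the rewrite author's own statement) =====
-- stated objective: alternative
-- what changed: Replaces A's pattern-major loop of substring containment tests (plus its redundant explicit '[error]' check) with a single left-to-right pass over the lowercased line driven by a module-level first-character dispatch dict built once from the distinct lowercased patterns.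
import Mathlib
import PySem

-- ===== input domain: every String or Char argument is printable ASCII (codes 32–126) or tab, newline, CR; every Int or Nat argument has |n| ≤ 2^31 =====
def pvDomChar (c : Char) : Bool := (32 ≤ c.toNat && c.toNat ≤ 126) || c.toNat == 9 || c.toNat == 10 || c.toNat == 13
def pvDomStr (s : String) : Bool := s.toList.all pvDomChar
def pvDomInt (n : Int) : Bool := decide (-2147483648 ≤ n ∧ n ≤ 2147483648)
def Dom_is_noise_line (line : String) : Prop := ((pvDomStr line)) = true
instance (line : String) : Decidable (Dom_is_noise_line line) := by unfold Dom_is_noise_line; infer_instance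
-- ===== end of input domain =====

-- B replaces A's pattern-major loop of containment tests (plus its redundant "[error]" fast path)
-- with a single pass over the line driven by a precomputed first-character dispatch table; alternative, same cost.

-- ===== PORT A =====
def noisePatterns : List String :=
  ["[ERROR]", "Command error:", "Traceback", "Exception", " failed:",
   "Error running", "Make sure", "not found", "timeout", "timed out", "Timeout"]

def is_noise_line (line : String) : Bool :=
  if line == "" then true
  else
    let lowerLine := PySem.Str.lower line
    if PySem.Str.isIn "[error]" lowerLine then true
    else noisePatterns.any (fun pat => PySem.Str.isIn (PySem.Str.lower pat) lowerLine)

-- ===== PORT B =====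
-- dict.fromkeys(pat.lower() for pat in patterns) = ordered dedup of the lowercased patterns
def lowPatterns : List String :=
  PySem.List.dedup (noisePatterns.map PySem.Str.lower)

-- _build_dispatch: table.setdefault(p[0], []).append(p) = Dict.modify with default [];
-- p[0] is ported as pyGet? p 0 (every pattern is nonempty, so it is always `some`; getD ' ' totalizes)
def dispatchTable : PySem.Dict Char (List String) :=
  lowPatterns.foldl
    (fun d p => d.modify ((PySem.Str.pyGet? p 0).getD ' ') [] (· ++ [p]))
    PySem.Dict.empty

def is_noise_line_alt (line : String) : Bool :=
  if line == "" then true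
  else
    let low := PySem.Str.lower line
    -- for i, ch in enumerate(low): indices produced by enumerate are ≥ 0, so .toNat is exact here;
    -- low.startswith(pat, i) = pat is a prefix of low dropped at i
    (PySem.List.enumerate low.toList).any (fun q =>
      (dispatchTable.getD q.2 []).any (fun pat =>
        PySem.Chars.startswith (low.toList.drop q.1.toNat) pat.toList))

-- ===== PRECONDITION & SPEC =====
def Spec_is_noise_line (line : String) (out : Bool) : Prop := out = is_noise_line_alt line
instance (line : String) (out : Bool) : Decidable (Spec_is_noise_line line out) := by unfold Spec_is_noise_line; infer_instance

-- ===== CLAIM (what is proved, stated in full; the proofs are below) =====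
def Claim_equal_is_noise_line : Prop := ∀ (line : String), Dom_is_noise_line line → Spec_is_noise_line line (is_noise_line line)

-- ===== LEMMAS AND PROOFS =====

lemma lowPatterns_eq : lowPatterns =
    ["[error]", "command error:", "traceback", "exception", " failed:",
     "error running", "make sure", "not found", "timeout", "timed out"] := by decide

lemma lowPatterns_ne_nil (q : String) (hq : q ∈ lowPatterns) : q.toList ≠ [] := by
  rw [lowPatterns_eq] at hq; fin_cases hq <;> decide

-- the dispatch table groups exactly the patterns by their first character
lemma getD_dispatchTable (ch : Char) :
    dispatchTable.getD ch [] =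
      lowPatterns.filter (fun p => ((PySem.Str.pyGet? p 0).getD ' ') == ch) := by
  unfold dispatchTable
  have h := PySem.Dict.getD_foldl_modify_append
    (lowPatterns.map (fun p => (((PySem.Str.pyGet? p 0).getD ' '), p))) PySem.Dict.empty ch
  rw [List.foldl_map] at h
  simpa [List.filter_map, Function.comp_def, List.map_map] using h

-- the head of a nonempty prefix
lemma head?_of_prefix (q l : List Char) (h : q <+: l) (hq : q ≠ []) : l.head? = q.head? := by
  rcases h with ⟨r, rfl⟩
  cases q with
  | nil => exact absurd rfl hq
  | cons x t => rfl

-- a nonempty pattern prefixing s.drop i starts with the character s[i]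
lemma key_of_prefix (q : String) (s : List Char) (i : Nat) (hi : i < s.length)
    (hq : q.toList ≠ []) (hpre : q.toList <+: s.drop i) :
    (PySem.List.pyGet? q.toList 0).getD ' ' = s[i] := by
  obtain ⟨c, t, hct⟩ : ∃ c t, q.toList = c :: t := by
    cases h : q.toList with
    | nil => exact absurd h hq
    | cons c t => exact ⟨c, t, rfl⟩
  have h2 : s[i]? = some c := by
    rw [← List.head?_drop, head?_of_prefix _ _ hpre hq, hct]; rfl
  have h3 : s[i] = c := by simpa [List.getElem?_eq_getElem hi] using h2
  simp [pysem, hct, h3]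

-- a bounded position scan finds exactly the infix occurrences of a nonempty pattern
lemma scan_iff (s p : List Char) (hp : p ≠ []) :
    (∃ i < s.length, p <+: s.drop i) ↔ PySem.Chars.isIn p s = true := by
  rw [← PySem.Chars.exists_prefix_drop_iff_isIn]
  constructor
  · rintro ⟨i, _, hpre⟩; exact ⟨i, hpre⟩
  · rintro ⟨j, hpre⟩
    by_cases hj : j < s.length
    · exact ⟨j, hj, hpre⟩
    · exfalso
      have : s.drop j = [] := List.drop_eq_nil_of_le (by omega)
      rw [this] at hpre
      exact hp (List.prefix_nil.mp hpre)

theorem is_noise_line_spec : Claim_equal_is_noise_line := by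
  intro line _
  unfold Spec_is_noise_line is_noise_line is_noise_line_alt
  by_cases h : line == ""
  · simp [h]
  · simp only [h, Bool.false_eq_true, if_false, Bool.if_true_left]
    rw [Bool.eq_iff_iff]
    simp only [List.any_eq_true, Bool.or_eq_true, decide_eq_true_eq,
      PySem.Chars.startswith_iff, PySem.Str.isIn_iff_infix]
    set s : List Char := (PySem.Str.lower line).toList with hs
    constructor
    · rintro hA
      -- reduce the left side to: some lowered pattern is an infix of s
      have hEx : ∃ q ∈ lowPatterns, q.toList <:+: s := by
        rcases hA with hE | ⟨pat, hmem, hinf⟩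
        · exact ⟨"[error]", by rw [lowPatterns_eq]; decide, hE⟩
        · exact ⟨PySem.Str.lower pat, by
            unfold lowPatterns
            simp only [PySem.List.dedup_eq_ofList, PySem.Set.mem_ofList]
            exact List.mem_map_of_mem hmem, hinf⟩
      rcases hEx with ⟨q, hq, hinf⟩
      have hne : q.toList ≠ [] := lowPatterns_ne_nil q hq
      have : PySem.Chars.isIn q.toList s = true := (PySem.Chars.isIn_iff_infix _ _).mpr hinf
      rcases (scan_iff s q.toList hne).mpr this with ⟨i, hi, hpre⟩
      refine ⟨((i : Int), s[i]), ?_, q, ?_, ?_⟩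
      · exact (PySem.List.mem_enumerate_iff s 0 _).mpr ⟨i, hi, by simp⟩
      · rw [getD_dispatchTable, List.mem_filter]
        exact ⟨hq, by simp [key_of_prefix q s i hi hne hpre]⟩
      · simpa using hpre
    · rintro ⟨⟨i0, ch⟩, hmem, pat, hpat, hpre⟩
      rcases (PySem.List.mem_enumerate_iff s 0 _).mp hmem with ⟨k, hk, hpk⟩
      obtain ⟨rfl, rfl⟩ : i0 = (k : Int) ∧ ch = s[k] := by
        constructor <;> simp [Prod.ext_iff] at hpk <;> simp [hpk]
      rw [getD_dispatchTable, List.mem_filter] at hpat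
      have hinf : pat.toList <:+: s := by
        have hpre' : pat.toList <+: s.drop k := by simpa using hpre
        exact hpre'.isInfix.trans (List.drop_suffix k s).isInfix
      right
      have : pat ∈ noisePatterns.map PySem.Str.lower := by
        have := hpat.1
        unfold lowPatterns at this
        simpa only [PySem.List.dedup_eq_ofList, PySem.Set.mem_ofList] using this
      rcases List.mem_map.mp this with ⟨p0, hp0, rfl⟩
      exact ⟨p0, hp0, hinf⟩
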